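-- pv_equiv track=rewrite | github.com/kodzyz/1824_GB_Algoritms_Structures | 1824_GB_Аlgorithm/Daviduk_Kosta_dz_2/task_2_7.py | count_down
-- ===== SOURCE A (Python) =====
-- def count_down(i):
--     a = []
--     if len(i) == 1:
--         a.extend(i[:1])
--     else:
--         a.extend(i[-1]) # последний
--         a.extend(count_down(i[:-1])) # без последнего
--     return a
-- ===== SOURCE B (Python) =====
-- def count_down(i):
--     return [c for c in reversed(i)]
-- ===== Notes on version B (the rewrite author's own statement) =====
-- stated objective: faster
-- what changed: replaced the O(n^2) recursion (each level slices the string and extends a fresh list) with a single reversed() pass building the list of characters directly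
import Mathlib
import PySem

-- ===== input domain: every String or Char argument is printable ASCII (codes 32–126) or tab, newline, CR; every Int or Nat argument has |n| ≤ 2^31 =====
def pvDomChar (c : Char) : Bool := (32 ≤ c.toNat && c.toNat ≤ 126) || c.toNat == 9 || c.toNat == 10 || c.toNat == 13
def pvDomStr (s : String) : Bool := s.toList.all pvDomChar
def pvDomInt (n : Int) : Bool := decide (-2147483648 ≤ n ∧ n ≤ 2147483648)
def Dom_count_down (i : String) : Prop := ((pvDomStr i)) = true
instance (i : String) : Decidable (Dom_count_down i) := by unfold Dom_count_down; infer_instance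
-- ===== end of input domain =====

-- B replaces A's quadratic slice-and-recurse with a single reversed pass; return values agree on all non-empty strings (A raises IndexError on "").


-- ===== PORT A =====
-- literal port of A's recursion: take the last character, recurse on the string without it.
def cdA : List Char → List String
  | [] => []          -- Python raises IndexError here; excluded by Pre_count_down
  | [c] => [String.ofList [c]]
  | c :: d :: l =>
      String.ofList [(c :: d :: l).getLast (by simp)] :: cdA (c :: d :: l).dropLast
termination_by l => l.length
decreasing_by simp [List.length_dropLast]

def count_down (i : String) : List String := cdA i.toList

-- ===== PORT B =====
def count_down_alt (i : String) : List String :=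
  i.toList.reverse.map (fun c => String.ofList [c])

-- ===== PRECONDITION & SPEC =====
-- Pre_ excludes exactly the empty string, on which A raises IndexError at i[-1].
def Pre_count_down (i : String) : Prop := i ≠ ""
instance (i : String) : Decidable (Pre_count_down i) := by unfold Pre_count_down; infer_instance
def pvWitness_count_down : String := "ab"

def Spec_count_down (i : String) (out : List String) : Prop := out = count_down_alt i
instance (i : String) (out : List String) : Decidable (Spec_count_down i out) := by unfold Spec_count_down; infer_instance

-- ===== CLAIM (what is proved, stated in full; the proofs are below) =====
def Claim_equal_count_down : Prop := ∀ (i : String), Dom_count_down i → Pre_count_down i → Spec_count_down i (count_down i)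

-- ===== LEMMAS AND PROOFS =====
lemma cdA_eq (l : List Char) : cdA l = l.reverse.map (fun c => String.ofList [c]) := by
  induction l using cdA.induct with
  | case1 => simp [cdA]
  | case2 c => simp [cdA]
  | case3 c d l ih =>
      rw [cdA, ih]
      have h : (c :: d :: l).dropLast ++ [(c :: d :: l).getLast (by simp)] = c :: d :: l :=
        List.dropLast_append_getLast (by simp)
      conv_rhs => rw [← h]
      simp

-- ===== VERDICT (by name: the statement is the Claim_ definition above) =====
theorem count_down_spec : Claim_equal_count_down := by
  intro i _ _
  unfold Spec_count_down count_down count_down_alt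
  exact cdA_eq i.toList
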